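-- pv_equiv track=rewrite | github.com/Charlo-tech/May-DSA-AH | 16-May-2023/mars.py | get_lifeform_score
-- ===== SOURCE A (Python) =====
-- def get_lifeform_score(grid):
--     score = 0
--     for i in range(5):
--         for j in range(5):
--             if grid[i][j] == 'X':
--                 tile = i * 5 + j
--                 score += 2 ** tile
--     return score
-- ===== SOURCE B (Python) =====
-- def get_lifeform_score(grid):
--     bits = ''.join('1' if grid[i][j] == 'X' else '0'
--                    for i in range(4, -1, -1) for j in range(4, -1, -1))
--     return int(bits, 2)
-- ===== Notes on version B (the rewrite author's own statement) =====
-- stated objective: alternative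
-- what changed: B first serialises the grid into a 25-character binary string (MSB tile first) and then parses that string with int(bits, 2), instead of A's nested loops accumulating a sum of 2**tile powers.
import Mathlib
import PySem

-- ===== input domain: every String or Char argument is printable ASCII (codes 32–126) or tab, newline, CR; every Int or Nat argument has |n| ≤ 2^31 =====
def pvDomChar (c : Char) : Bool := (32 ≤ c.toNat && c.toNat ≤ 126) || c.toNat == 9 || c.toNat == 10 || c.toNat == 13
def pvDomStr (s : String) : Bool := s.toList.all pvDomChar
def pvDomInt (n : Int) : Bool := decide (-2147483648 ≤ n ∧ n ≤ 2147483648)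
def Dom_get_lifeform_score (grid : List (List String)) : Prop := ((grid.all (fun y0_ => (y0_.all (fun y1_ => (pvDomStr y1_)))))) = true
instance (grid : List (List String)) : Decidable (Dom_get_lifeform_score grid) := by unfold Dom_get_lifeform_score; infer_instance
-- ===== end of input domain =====

-- B serialises the grid into a 25-character binary string (MSB tile first) and parses
-- it base 2, instead of A's nested loops summing 2**tile powers (same cost, staged passes).

-- ===== PORT A =====
def get_lifeform_score (grid : List (List String)) : Int :=
  (PySem.List.pyRange 0 5 1).foldl (fun score i =>
    (PySem.List.pyRange 0 5 1).foldl (fun score j =>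
      if PySem.List.pyGetD (PySem.List.pyGetD grid i []) j "" = "X" then
        score + 2 ^ (i * 5 + j).toNat
      else score) score) 0

-- ===== PORT B =====
-- hand port of int(s, 2); exact for non-empty strings of '0'/'1' digits, which is the
-- only shape B ever feeds it (25 characters, each '0' or '1')
def pvParse2 (s : String) : Int :=
  s.toList.foldl (fun a c => a * 2 + (if c = '1' then 1 else 0)) 0

def get_lifeform_score_alt (grid : List (List String)) : Int :=
  pvParse2 (PySem.Str.join ""
    ((PySem.List.pyRange 4 (-1) (-1)).flatMap (fun i =>
      (PySem.List.pyRange 4 (-1) (-1)).map (fun j =>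
        if PySem.List.pyGetD (PySem.List.pyGetD grid i []) j "" = "X" then "1" else "0"))))

-- ===== PRECONDITION & SPEC =====
-- A (and B alike) raises IndexError unless the grid has at least 5 rows and each of
-- the first 5 rows has at least 5 cells; Pre_ admits exactly the inputs where A returns.
def Pre_get_lifeform_score (grid : List (List String)) : Prop :=
  5 ≤ grid.length ∧ ∀ r ∈ grid.take 5, 5 ≤ r.length
instance (grid : List (List String)) : Decidable (Pre_get_lifeform_score grid) := by
  unfold Pre_get_lifeform_score; infer_instance

def pvWitness_get_lifeform_score : List (List String) :=
  [["X", ".", ".", ".", "X"], [".", "X", ".", ".", "."], [".", ".", "X", ".", "."],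
   [".", ".", ".", "X", "."], ["X", ".", ".", ".", "X"]]

def Spec_get_lifeform_score (grid : List (List String)) (out : Int) : Prop := out = get_lifeform_score_alt grid
instance (grid : List (List String)) (out : Int) : Decidable (Spec_get_lifeform_score grid out) := by unfold Spec_get_lifeform_score; infer_instance

-- ===== CLAIM (what is proved, stated in full; the proofs are below) =====
def Claim_equal_get_lifeform_score : Prop := ∀ (grid : List (List String)), Dom_get_lifeform_score grid → Pre_get_lifeform_score grid → Spec_get_lifeform_score grid (get_lifeform_score grid)

-- ===== LEMMAS AND PROOFS =====
lemma pick0 {α : Type} (x0 x1 x2 x3 x4 : α) (t : List α) (d : α) :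
    PySem.List.pyGetD (x0::x1::x2::x3::x4::t) (0:Int) d = x0 := by
  rw [PySem.List.pyGetD_ofNat' _ 0]; rfl

lemma pick1 {α : Type} (x0 x1 x2 x3 x4 : α) (t : List α) (d : α) :
    PySem.List.pyGetD (x0::x1::x2::x3::x4::t) (1:Int) d = x1 := by
  rw [PySem.List.pyGetD_ofNat' _ 1]; rfl

lemma pick2 {α : Type} (x0 x1 x2 x3 x4 : α) (t : List α) (d : α) :
    PySem.List.pyGetD (x0::x1::x2::x3::x4::t) (2:Int) d = x2 := by
  rw [PySem.List.pyGetD_ofNat' _ 2]; rfl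

lemma pick3 {α : Type} (x0 x1 x2 x3 x4 : α) (t : List α) (d : α) :
    PySem.List.pyGetD (x0::x1::x2::x3::x4::t) (3:Int) d = x3 := by
  rw [PySem.List.pyGetD_ofNat' _ 3]; rfl

lemma pick4 {α : Type} (x0 x1 x2 x3 x4 : α) (t : List α) (d : α) :
    PySem.List.pyGetD (x0::x1::x2::x3::x4::t) (4:Int) d = x4 := by
  rw [PySem.List.pyGetD_ofNat' _ 4]; rfl

lemma ite_acc (c : Prop) [Decidable c] (s a : Int) :
    (if c then s + a else s) = s + (if c then a else 0) := by split <;> simp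

lemma itePow2X (c : Prop) [Decidable c] (k : Nat) :
    (if c then ((2:Int) ^ k) else 0) = 2 ^ k * (if c then 1 else 0) := by split <;> simp

lemma iteBitToList (c : Prop) [Decidable c] :
    (if c then "1" else "0").toList = [if c then '1' else '0'] := by split <;> rfl

lemma iteBitEq (c : Prop) [Decidable c] :
    (if (if c then '1' else '0') = '1' then (1:Int) else 0) = (if c then 1 else 0) := by
  split <;> simp

set_option maxHeartbeats 2000000 in
lemma key (r0 r1 r2 r3 r4 : List String) (rest : List (List String))
    (h0 : 5 ≤ r0.length) (h1 : 5 ≤ r1.length) (h2 : 5 ≤ r2.length)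
    (h3 : 5 ≤ r3.length) (h4 : 5 ≤ r4.length) :
    get_lifeform_score (r0 :: r1 :: r2 :: r3 :: r4 :: rest)
      = get_lifeform_score_alt (r0 :: r1 :: r2 :: r3 :: r4 :: rest) := by
  match r0, h0 with
  | a0 :: a1 :: a2 :: a3 :: a4 :: _, _ =>
  match r1, h1 with
  | b0 :: b1 :: b2 :: b3 :: b4 :: _, _ =>
  match r2, h2 with
  | c0 :: c1 :: c2 :: c3 :: c4 :: _, _ =>
  match r3, h3 with
  | d0 :: d1 :: d2 :: d3 :: d4 :: _, _ =>
  match r4, h4 with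
  | e0 :: e1 :: e2 :: e3 :: e4 :: _, _ =>
  have h5 : PySem.List.pyRange 0 5 1 = [0, 1, 2, 3, 4] := by decide
  have hrev : PySem.List.pyRange 4 (-1) (-1) = [4, 3, 2, 1, 0] := by decide
  simp only [get_lifeform_score, get_lifeform_score_alt, pvParse2, h5, hrev,
    List.foldl_cons, List.foldl_nil, List.flatMap_cons, List.flatMap_nil,
    List.map_cons, List.map_nil, List.append_nil, List.cons_append, List.nil_append,
    pick0, pick1, pick2, pick3, pick4, ite_acc]
  simp only [PySem.Str.toList_join, List.map_cons, List.map_nil, iteBitToList]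
  rw [show ("".toList : List Char) = [] from rfl]
  simp only [PySem.Chars.join_cons_cons, PySem.Chars.join_singleton,
    List.append_nil, List.nil_append, List.cons_append]
  simp only [List.foldl_cons, List.foldl_nil, iteBitEq]
  simp only [show ((0:Int) * 5 + 0).toNat = 0 from rfl,
    show ((0:Int) * 5 + 1).toNat = 1 from rfl,
    show ((0:Int) * 5 + 2).toNat = 2 from rfl,
    show ((0:Int) * 5 + 3).toNat = 3 from rfl,
    show ((0:Int) * 5 + 4).toNat = 4 from rfl,
    show ((1:Int) * 5 + 0).toNat = 5 from rfl,
    show ((1:Int) * 5 + 1).toNat = 6 from rfl,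
    show ((1:Int) * 5 + 2).toNat = 7 from rfl,
    show ((1:Int) * 5 + 3).toNat = 8 from rfl,
    show ((1:Int) * 5 + 4).toNat = 9 from rfl,
    show ((2:Int) * 5 + 0).toNat = 10 from rfl,
    show ((2:Int) * 5 + 1).toNat = 11 from rfl,
    show ((2:Int) * 5 + 2).toNat = 12 from rfl,
    show ((2:Int) * 5 + 3).toNat = 13 from rfl,
    show ((2:Int) * 5 + 4).toNat = 14 from rfl,
    show ((3:Int) * 5 + 0).toNat = 15 from rfl,
    show ((3:Int) * 5 + 1).toNat = 16 from rfl,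
    show ((3:Int) * 5 + 2).toNat = 17 from rfl,
    show ((3:Int) * 5 + 3).toNat = 18 from rfl,
    show ((3:Int) * 5 + 4).toNat = 19 from rfl,
    show ((4:Int) * 5 + 0).toNat = 20 from rfl,
    show ((4:Int) * 5 + 1).toNat = 21 from rfl,
    show ((4:Int) * 5 + 2).toNat = 22 from rfl,
    show ((4:Int) * 5 + 3).toNat = 23 from rfl,
    show ((4:Int) * 5 + 4).toNat = 24 from rfl]
  simp only [itePow2X]
  ring_nf

-- ===== VERDICT (by name: the statement is the Claim_ definition above) =====
theorem get_lifeform_score_spec : Claim_equal_get_lifeform_score := by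
  intro grid _ hpre
  obtain ⟨hlen, hrows⟩ := hpre
  match grid, hlen with
  | r0 :: r1 :: r2 :: r3 :: r4 :: rest, _ =>
    show get_lifeform_score _ = get_lifeform_score_alt _
    exact key r0 r1 r2 r3 r4 rest
      (hrows r0 (by simp)) (hrows r1 (by simp)) (hrows r2 (by simp))
      (hrows r3 (by simp)) (hrows r4 (by simp))
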